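-- pv_equiv track=rewrite | github.com/Hayford08/advent-of-code | 2025/Day05/day05.py | is_within
-- ===== SOURCE A (Python) =====
-- def is_within(intervals, x):
--     """
--     Checks if x is within any of the sorted [l, r] ranges in intervals
--     """
--     l, r = 0, len(intervals) - 1
--     while l <= r:
--         mid = l + (r - l) // 2
--         start, end = intervals[mid]
--         if start <= x <= end:
--             return True
--         if x < start:
--             r = mid - 1
--         else:
--             l = mid + 1
--     return False
-- ===== SOURCE B (Python) =====
-- def _build(intervals):
--     """Implicit binary-search tree of the list: node = (pair, left, right)."""
--     if not intervals:
--         return None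
--     mid = (len(intervals) - 1) // 2
--     return (intervals[mid], _build(intervals[:mid]), _build(intervals[mid + 1:]))
--
--
-- def is_within(intervals, x):
--     t = _build(intervals)
--     while t is not None:
--         (start, end), left, right = t
--         if start <= x <= end:
--             return True
--         t = left if x < start else right
--     return False
-- ===== Notes on version B (the rewrite author's own statement) =====
-- stated objective: alternative
-- what changed: The iterative (l, r) index-bound binary-search loop is replaced by a two-stage algorithm: first build an explicit binary-search tree from the list (root = middle element, subtrees from the two halves), then iteratively descend the tree comparing x with each node's interval.
import Mathlib
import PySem

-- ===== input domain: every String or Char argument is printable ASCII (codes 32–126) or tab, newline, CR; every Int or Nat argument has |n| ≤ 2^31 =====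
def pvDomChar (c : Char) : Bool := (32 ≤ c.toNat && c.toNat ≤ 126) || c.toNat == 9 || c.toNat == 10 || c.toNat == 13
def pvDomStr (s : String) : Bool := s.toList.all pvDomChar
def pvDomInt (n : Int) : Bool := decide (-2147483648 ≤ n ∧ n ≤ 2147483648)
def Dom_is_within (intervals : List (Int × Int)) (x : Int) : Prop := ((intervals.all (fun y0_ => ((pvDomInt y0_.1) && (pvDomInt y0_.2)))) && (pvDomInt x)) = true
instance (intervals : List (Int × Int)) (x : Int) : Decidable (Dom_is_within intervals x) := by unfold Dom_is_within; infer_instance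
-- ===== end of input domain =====

-- B replaces the iterative (l, r) index-bound binary-search loop by two stages:
-- build an explicit binary-search tree of the list, then descend it (alternative decomposition).


-- ===== PORT A =====
-- A's while-loop as recursion on the state (l, r); the Nat fuel is only a termination
-- gadget (one unit per iteration; the gap r + 1 - l shrinks each time, and the initial
-- fuel covers the initial gap, so the fuel-out branch is never taken from is_within).
-- The pyGet? 'none' branch is Python's (unreachable) IndexError.
def is_within_loop (intervals : List (Int × Int)) (x : Int) : Nat → Int → Int → Bool
  | 0, _, _ => false
  | Nat.succ fuel, l, r =>
    if l ≤ r then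
      let mid := l + PySem.Int.floordiv (r - l) 2
      match PySem.List.pyGet? intervals mid with
      | none => false
      | some (s, e) =>
        if s ≤ x ∧ x ≤ e then true
        else if x < s then is_within_loop intervals x fuel l (mid - 1)
        else is_within_loop intervals x fuel (mid + 1) r
    else false

def is_within (intervals : List (Int × Int)) (x : Int) : Bool :=
  is_within_loop intervals x (intervals.length + 1) 0 ((intervals.length : Int) - 1)

-- ===== PORT B =====
-- Source B's _build: the implicit binary-search tree of the list (None -> leaf,
-- (pair, left, right) -> node); for a nonempty list the index (len-1)//2 is in
-- range, so Python's intervals[mid] is ported as a proof-carrying getElem.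
inductive PVTree : Type
  | leaf : PVTree
  | node : (Int × Int) → PVTree → PVTree → PVTree
deriving DecidableEq, Repr

def pvBuild (l : List (Int × Int)) : PVTree :=
  if h : l = [] then PVTree.leaf
  else
    have hpos : 0 < l.length := List.length_pos_iff.mpr h
    PVTree.node (l[(l.length - 1) / 2]'(Nat.lt_of_le_of_lt (Nat.div_le_self _ _) (by omega)))
      (pvBuild (l.take ((l.length - 1) / 2)))
      (pvBuild (l.drop ((l.length - 1) / 2 + 1)))
termination_by l.length
decreasing_by
  · simp only [List.length_take]
    have hpos : 0 < l.length := List.length_pos_iff.mpr h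
    have : (l.length - 1) / 2 ≤ l.length - 1 := Nat.div_le_self _ _
    omega
  · simp only [List.length_drop]
    have hpos : 0 < l.length := List.length_pos_iff.mpr h
    omega

-- Source B's while-loop over the tree: structural descent (left when x < start, else right)
def pvSearch (x : Int) : PVTree → Bool
  | PVTree.leaf => false
  | PVTree.node p left right =>
    if p.1 ≤ x ∧ x ≤ p.2 then true
    else if x < p.1 then pvSearch x left
    else pvSearch x right

def is_within_alt (intervals : List (Int × Int)) (x : Int) : Bool :=
  pvSearch x (pvBuild intervals)

-- ===== PRECONDITION & SPEC =====
def Spec_is_within (intervals : List (Int × Int)) (x : Int) (out : Bool) : Prop := out = is_within_alt intervals x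
instance (intervals : List (Int × Int)) (x : Int) (out : Bool) : Decidable (Spec_is_within intervals x out) := by unfold Spec_is_within; infer_instance

-- ===== CLAIM (what is proved, stated in full; the proofs are below) =====
def Claim_equal_is_within : Prop := ∀ (intervals : List (Int × Int)) (x : Int), Dom_is_within intervals x → Spec_is_within intervals x (is_within intervals x)

-- ===== LEMMAS AND PROOFS =====

theorem pvBuild_nil : pvBuild [] = PVTree.leaf := by rw [pvBuild]; simp

-- A's loop on bounds (l, r) computes B's descent of the tree built from the
-- segment intervals[l .. r], for any sufficient fuel
theorem loop_eq_search (intervals : List (Int × Int)) (x : Int) :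
    ∀ (fa : Nat) (l r : Int), (r + 1 - l).toNat ≤ fa →
      0 ≤ l → r < (intervals.length : Int) →
      is_within_loop intervals x fa l r =
        pvSearch x (pvBuild ((intervals.drop l.toNat).take (r + 1 - l).toNat)) := by
  intro fa
  induction fa with
  | zero =>
    intro l r hfa _ _
    have h0 : (r + 1 - l).toNat = 0 := by omega
    rw [h0]
    simp [is_within_loop, pvBuild_nil, pvSearch]
  | succ fa ih =>
    intro l r hfa hl hr
    by_cases hlr : l ≤ r
    · have hfd : PySem.Int.floordiv (r - l) 2 = (r - l) / 2 :=
        PySem.Int.floordiv_eq_ediv_of_pos (by norm_num)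
      set q : Int := (r - l) / 2 with hqdef
      have hq0 : 0 ≤ q := by omega
      have hqle : q ≤ r - l := by omega
      set seg : List (Int × Int) := (intervals.drop l.toNat).take (r + 1 - l).toNat with hseg
      have hseglen : seg.length = (r + 1 - l).toNat := by
        simp only [hseg, List.length_take, List.length_drop]; omega
      have hsegne : seg ≠ [] := by
        intro hc; have := congrArg List.length hc; simp [hseglen] at this; omega
      have hmidseg : (seg.length - 1) / 2 = q.toNat := by
        rw [hseglen]; omega
      have hmidlt : (l + PySem.Int.floordiv (r - l) 2).toNat < intervals.length := by
        rw [hfd]; omega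
      have hmidA : PySem.List.pyGet? intervals (l + PySem.Int.floordiv (r - l) 2) =
          some (intervals[(l + PySem.Int.floordiv (r - l) 2).toNat]'hmidlt) :=
        PySem.List.pyGet?_eq_some_getElem intervals (by omega) (by rw [hfd]; omega)
      rcases hse : intervals[(l + PySem.Int.floordiv (r - l) 2).toNat]'hmidlt with ⟨s, e⟩
      rw [hse] at hmidA
      have hqltN : q.toNat < seg.length := by rw [hseglen]; omega
      have hidx : l.toNat + q.toNat = (l + PySem.Int.floordiv (r - l) 2).toNat := by
        rw [hfd]; omega
      have hsameq : seg[q.toNat]'hqltN = (s, e) := by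
        rw [← hse]
        simp only [hseg, List.getElem_take, List.getElem_drop]
        simp only [hidx]
      have hsame : seg[(seg.length - 1) / 2]'(Nat.lt_of_le_of_lt (Nat.div_le_self _ _)
          (by have := hseglen; omega)) = (s, e) := by
        rw [← hsameq]
        simp only [hmidseg]
      rw [pvBuild, dif_neg hsegne]
      simp only [is_within_loop, if_pos hlr, hmidA, hsame, pvSearch]
      by_cases hin : s ≤ x ∧ x ≤ e
      · rw [if_pos hin, if_pos hin]
      · rw [if_neg hin, if_neg hin]
        by_cases hlt : x < s
        · rw [if_pos hlt, if_pos hlt, hmidseg, hseg, List.take_take]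
          have hm : min q.toNat (r + 1 - l).toNat
              = (l + PySem.Int.floordiv (r - l) 2 - 1 + 1 - l).toNat := by
            rw [hfd]; omega
          rw [hm]
          exact ih l _ (by rw [hfd]; omega) hl (by rw [hfd]; omega)
        · rw [if_neg hlt, if_neg hlt, hmidseg, hseg, List.drop_take, List.drop_drop]
          have hm1 : (r + 1 - l).toNat - (q.toNat + 1)
              = (r + 1 - (l + PySem.Int.floordiv (r - l) 2 + 1)).toNat := by
            rw [hfd]; omega
          have hm2 : l.toNat + (q.toNat + 1) = (l + PySem.Int.floordiv (r - l) 2 + 1).toNat := by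
            rw [hfd]; omega
          rw [hm1, hm2]
          exact ih _ r (by rw [hfd]; omega) (by rw [hfd]; omega) hr
    · have h0 : (r + 1 - l).toNat = 0 := by omega
      rw [h0]
      simp [is_within_loop, if_neg hlr, pvBuild_nil, pvSearch]

-- ===== VERDICT (by name: the statement is the Claim_ definition above) =====
theorem is_within_spec : Claim_equal_is_within := by
  intro intervals x _
  unfold Spec_is_within is_within is_within_alt
  have h := loop_eq_search intervals x (intervals.length + 1) 0
    ((intervals.length : Int) - 1) (by omega) le_rfl (by omega)
  have hseg : ((intervals.drop (0:Int).toNat).take ((intervals.length : Int) - 1 + 1 - 0).toNat) = intervals := by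
    simp
  rw [h, hseg]
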